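-- pv_equiv track=rewrite | github.com/Ryan-Reese/ailsi_iKraph | NER/pipeline_step5/ensemble_noReport.py | refine_tag
-- ===== SOURCE A (Python) =====
-- def refine_tag(input_tag, entity):
--     '''
--     refine: 'OIB' to 'OBI', 'OBB' to 'OBI', 'OBIB' to 'OBII'. Here B and I are same entity type.
--     input: input_tag is a list of tags within 6 entities, e.g. ['I-ChemicalEntity', 'O', 'I-ChemicalEntity','I-ChemicalEntity','O']
--     output: refined_tag is a list of refined tags, e.g. ['B-ChemicalEntity', 'O', 'B-ChemicalEntity','I-ChemicalEntity','O']
--     '''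
--     full_refined_tag = []
--     for sent in input_tag:
--         refined_tag = []
--         #entity = ['DiseaseOrPhenotypicFeature', 'ChemicalEntity', 'OrganismTaxon', 'GeneOrGeneProduct', 'SequenceVariant', 'CellLine']
--         flag = [0 for i in range (len(entity))]        # flag use to decide if asign B or I
--         for candidate in sent:
--             if candidate == 'O':    # the top candidate is "O"
--                 refined_tag.append('O')
--                 flag = [0 for j in range (len(entity))]
--             else:
--                 if flag[entity.index(candidate.split('-')[1])] == 0:    # the previous position "O", assign "B"
--                     refined_tag.append('B-'+candidate.split('-')[1])
--                     flag = [0 for j in range (len(entity))] # reset flag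
--                     flag[entity.index(candidate.split('-')[1])] = 1
--                 else:   # the previous position is "B" or "I", assign "I"
--                     refined_tag.append('I-'+candidate.split('-')[1])
--         full_refined_tag.append(refined_tag)
--     return full_refined_tag
-- ===== SOURCE B (Python) =====
-- def refine_tag(input_tag, entity):
--     '''Same BIO refinement, computed without the mutable flag array:
--     map every tag to a group key, then decide B/I by comparing each
--     key with its left neighbour.'''
--     def refine_sent(sent):
--         keys = ['O' if c == 'O' else entity.index(c.split('-')[1]) for c in sent]
--         prevs = ['O'] + keys[:-1]
--         return ['O' if k == 'O'
--                 else ('I-' if k == p else 'B-') + c.split('-')[1]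
--                 for c, k, p in zip(sent, keys, prevs)]
--     return [refine_sent(sent) for sent in input_tag]
-- ===== Notes on version B (the rewrite author's own statement) =====
-- stated objective: alternative
-- what changed: Replaces A's stateful per-entity flag array (reset/set inside a loop) with a stateless two-pass per sentence: map each tag to a group key, then emit B/I by comparing each key with its left neighbour via zip.
import Mathlib
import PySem

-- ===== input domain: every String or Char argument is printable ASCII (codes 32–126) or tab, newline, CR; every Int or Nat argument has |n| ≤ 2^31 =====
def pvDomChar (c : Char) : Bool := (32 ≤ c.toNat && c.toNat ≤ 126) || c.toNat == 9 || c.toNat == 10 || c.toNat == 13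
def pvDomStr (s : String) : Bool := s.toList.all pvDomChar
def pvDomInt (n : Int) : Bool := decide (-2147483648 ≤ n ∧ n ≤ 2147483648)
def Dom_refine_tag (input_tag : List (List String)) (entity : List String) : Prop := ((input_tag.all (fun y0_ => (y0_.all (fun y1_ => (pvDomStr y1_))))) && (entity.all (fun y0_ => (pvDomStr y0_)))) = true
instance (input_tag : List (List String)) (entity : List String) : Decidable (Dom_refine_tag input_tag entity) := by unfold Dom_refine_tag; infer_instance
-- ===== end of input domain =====

-- B replaces A's mutable per-entity flag array with a stateless two-pass per sentence
-- (group keys, then neighbour comparison); same values, no speed claim.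

-- shared helper: candidate.split('-')[1] (both Pythons compute this very expression;
-- the [1] IndexError and the entity.index ValueError are excluded by Pre_)
def pvTyp (c : String) : String := ((PySem.Str.split? c "-").getD []).getD 1 ""

-- ===== PORT A =====
-- the body of A's inner loop, named so the lemmas below can speak about one step
def pvStepA (entity : List String) (st : List String × List Int) (candidate : String) :
    List String × List Int :=
  if candidate = "O" then
    (st.1 ++ ["O"], entity.map (fun _ => (0 : Int)))
  else
    let t := pvTyp candidate
    let idx := (PySem.List.index? entity t).getD 0
    if st.2.getD idx 0 = 0 then
      (st.1 ++ ["B-" ++ t], (entity.map (fun _ => (0 : Int))).set idx 1)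
    else
      (st.1 ++ ["I-" ++ t], st.2)

def refine_tag (input_tag : List (List String)) (entity : List String) : List (List String) :=
  input_tag.foldl (fun full sent =>
    full ++ [(sent.foldl (pvStepA entity)
      (([] : List String), entity.map (fun _ => (0 : Int)))).1]) []

-- ===== PORT B =====
-- group key of a tag: none plays Python's 'O' key, some i is entity.index(type)
def pvKey (entity : List String) (c : String) : Option Nat :=
  if c = "O" then none else PySem.List.index? entity (pvTyp c)

def refine_tag_alt (input_tag : List (List String)) (entity : List String) : List (List String) :=
  input_tag.map (fun sent =>
    let keys := sent.map (pvKey entity)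
    let prevs := (none : Option Nat) :: keys.dropLast
    (sent.zip (keys.zip prevs)).map (fun ckp =>
      match ckp.2.1 with
      | none => "O"
      | some _ => (if ckp.2.1 = ckp.2.2 then "I-" else "B-") ++ pvTyp ckp.1))

-- ===== PRECONDITION & SPEC =====
-- Pre_ excludes exactly the inputs where Python A raises: a non-'O' tag without a '-'
-- (IndexError on split('-')[1]) or whose type is not in entity (ValueError on .index).
def Pre_refine_tag (input_tag : List (List String)) (entity : List String) : Prop :=
  ∀ sent ∈ input_tag, ∀ c ∈ sent, c ≠ "O" →
    2 ≤ ((PySem.Str.split? c "-").getD []).length ∧ pvTyp c ∈ entity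
instance (input_tag : List (List String)) (entity : List String) : Decidable (Pre_refine_tag input_tag entity) := by unfold Pre_refine_tag; infer_instance

def pvWitness_refine_tag : List (List String) × List String :=
  ([["I-X", "O", "B-Y", "B-Y", "I-X"]], ["Y", "X"])

def Spec_refine_tag (input_tag : List (List String)) (entity : List String) (out : List (List String)) : Prop := out = refine_tag_alt input_tag entity
instance (input_tag : List (List String)) (entity : List String) (out : List (List String)) : Decidable (Spec_refine_tag input_tag entity out) := by unfold Spec_refine_tag; infer_instance

-- ===== CLAIM (what is proved, stated in full; the proofs are below) =====
def Claim_equal_refine_tag : Prop := ∀ (input_tag : List (List String)) (entity : List String), Dom_refine_tag input_tag entity → Pre_refine_tag input_tag entity → Spec_refine_tag input_tag entity (refine_tag input_tag entity)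

-- ===== LEMMAS AND PROOFS =====

-- the common per-sentence result, as a recursion carrying the previous group key
def pvEmit (entity : List String) (p : Option Nat) : List String → List String
  | [] => []
  | c :: cs =>
    (match pvKey entity c with
     | none => "O"
     | some _ => (if pvKey entity c = p then "I-" else "B-") ++ pvTyp c)
      :: pvEmit entity (pvKey entity c) cs

-- A's flag list as a function of the previous group key
def pvFlag (entity : List String) : Option Nat → List Int
  | none => entity.map (fun _ => 0)
  | some i => (entity.map (fun _ => (0 : Int))).set i 1

lemma pvFlag_getD (entity : List String) (p : Option Nat) (idx : Nat)
    (hidx : idx < entity.length) :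
    (pvFlag entity p).getD idx 0 = if p = some idx then 1 else 0 := by
  cases p with
  | none =>
    simp [pvFlag, List.getD_eq_getElem?_getD, hidx]
  | some i =>
    by_cases hi : i = idx
    · subst hi
      simp [pvFlag, List.getD_eq_getElem?_getD, hidx]
    · simp [pvFlag, List.getD_eq_getElem?_getD, hidx, hi]

lemma pvStepA_O (entity : List String) (st : List String × List Int) :
    pvStepA entity st "O" = (st.1 ++ ["O"], pvFlag entity none) := by
  simp [pvStepA, pvFlag]

lemma pvStepA_key (entity : List String) (acc : List String) (p : Option Nat)
    (c : String) (idx : Nat) (hO : ¬ c = "O")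
    (hidx : PySem.List.index? entity (pvTyp c) = some idx)
    (hlt : idx < entity.length) :
    pvStepA entity (acc, pvFlag entity p) c
      = (acc ++ [(if p = some idx then "I-" else "B-") ++ pvTyp c],
         pvFlag entity (some idx)) := by
  unfold pvStepA
  rw [if_neg hO]
  simp only [hidx, Option.getD_some]
  rw [pvFlag_getD entity p idx hlt]
  by_cases hp : p = some idx
  · rw [if_pos hp]
    simp only [one_ne_zero, if_false, if_pos hp]
    rw [hp]
  · rw [if_neg hp]
    simp only [if_neg hp]
    rfl

lemma A_loop (entity : List String) :
    ∀ (sent : List String) (acc : List String) (p : Option Nat),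
    (∀ c ∈ sent, c ≠ "O" → pvTyp c ∈ entity) →
    ∃ q, sent.foldl (pvStepA entity) (acc, pvFlag entity p)
      = (acc ++ pvEmit entity p sent, pvFlag entity q) := by
  intro sent
  induction sent with
  | nil => intro acc p _; exact ⟨p, by simp [pvEmit]⟩
  | cons c cs ih =>
    intro acc p hpre
    rw [List.foldl_cons]
    by_cases hO : c = "O"
    · subst hO
      rw [pvStepA_O]
      obtain ⟨q, hq⟩ := ih (acc ++ ["O"]) none
        (fun x hx => hpre x (List.mem_cons_of_mem _ hx))
      refine ⟨q, ?_⟩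
      rw [hq]
      simp [pvEmit, pvKey]
    · have hmem : pvTyp c ∈ entity := hpre c List.mem_cons_self hO
      obtain ⟨idx, hidx⟩ : ∃ idx, PySem.List.index? entity (pvTyp c) = some idx :=
        Option.isSome_iff_exists.mp
          ((PySem.List.index?_isSome_iff (xs := entity) (v := pvTyp c)).mpr hmem)
      have hlt : idx < entity.length := by
        obtain ⟨hk, _, _⟩ := PySem.List.getElem_of_index?_eq_some hidx
        exact hk
      have hkey : pvKey entity c = some idx := by
        unfold pvKey; rw [if_neg hO, hidx]
      rw [pvStepA_key entity acc p c idx hO hidx hlt]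
      obtain ⟨q, hq⟩ := ih (acc ++ [(if p = some idx then "I-" else "B-") ++ pvTyp c])
        (some idx) (fun x hx => hpre x (List.mem_cons_of_mem _ hx))
      refine ⟨q, ?_⟩
      rw [hq]
      simp only [pvEmit, hkey, List.append_assoc, List.singleton_append]
      by_cases hp : p = some idx
      · rw [if_pos hp, if_pos hp.symm]
      · rw [if_neg hp, if_neg (fun h => hp h.symm)]

lemma B_zip (entity : List String) :
    ∀ (sent : List String) (p : Option Nat),
    (sent.zip ((sent.map (pvKey entity)).zip (p :: (sent.map (pvKey entity)).dropLast))).map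
      (fun ckp =>
        match ckp.2.1 with
        | none => "O"
        | some _ => (if ckp.2.1 = ckp.2.2 then "I-" else "B-") ++ pvTyp ckp.1)
      = pvEmit entity p sent := by
  intro sent
  induction sent with
  | nil => intro p; simp [pvEmit]
  | cons c cs ih =>
    intro p
    cases cs with
    | nil =>
      rw [show ([c].zip (([c].map (pvKey entity)).zip
            (p :: ([c].map (pvKey entity)).dropLast))) = [(c, (pvKey entity c, p))] from rfl]
      cases h : pvKey entity c <;> simp [pvEmit, h]
    | cons c' cs' =>
      have hdl : (List.map (pvKey entity) (c :: c' :: cs')).dropLast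
          = pvKey entity c :: (List.map (pvKey entity) (c' :: cs')).dropLast := by
        simp only [List.map_cons]
        exact List.dropLast_cons₂
      rw [hdl]
      rw [show ((c :: c' :: cs').zip ((List.map (pvKey entity) (c :: c' :: cs')).zip
            (p :: pvKey entity c :: (List.map (pvKey entity) (c' :: cs')).dropLast)))
          = (c, (pvKey entity c, p)) :: ((c' :: cs').zip ((List.map (pvKey entity) (c' :: cs')).zip
            (pvKey entity c :: (List.map (pvKey entity) (c' :: cs')).dropLast))) from rfl]
      rw [List.map_cons, ih (pvKey entity c)]
      cases h : pvKey entity c <;> simp [pvEmit, h]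

lemma refine_tag_eq (input_tag : List (List String)) (entity : List String)
    (hpre : Pre_refine_tag input_tag entity) :
    refine_tag input_tag entity = input_tag.map (fun sent => pvEmit entity none sent) := by
  unfold refine_tag
  rw [PySem.List.foldl_append_singleton_eq_map]
  simp only [List.nil_append]
  apply List.map_congr_left
  intro sent hsent
  rw [show (([] : List String), entity.map (fun _ => (0 : Int)))
      = (([] : List String), pvFlag entity none) from rfl]
  obtain ⟨q, hq⟩ := A_loop entity sent [] none
    (fun c hc hO => (hpre sent hsent c hc hO).2)
  rw [hq]
  simp

lemma refine_tag_alt_eq (input_tag : List (List String)) (entity : List String) :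
    refine_tag_alt input_tag entity = input_tag.map (fun sent => pvEmit entity none sent) := by
  unfold refine_tag_alt
  apply List.map_congr_left
  intro sent _
  exact B_zip entity sent none

-- ===== VERDICT (by name: the statement is the Claim_ definition above) =====
theorem refine_tag_spec : Claim_equal_refine_tag := by
  intro input_tag entity _ hpre
  unfold Spec_refine_tag
  rw [refine_tag_eq input_tag entity hpre, refine_tag_alt_eq]
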